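-- pv_equiv track=rewrite | github.com/mishka251/stalker_op22_cyclic_quest_wiki | game_parser/management/commands/fill_cyclic_quest_items.py | _parse_item_rewards
-- ===== SOURCE A (Python) =====
-- def _parse_item_rewards(reward_item_string: str) -> list[tuple[str, int]]:
--     parts = [s.strip() for s in reward_item_string.split(",")]
--     prev_name = None
--     result: list[tuple[str, int]] = []
--     for part in parts:
--         if part.isdigit():
--             cnt = int(part)
--             if prev_name is None:
--                 raise TypeError
--             result.append((prev_name, cnt))
--             prev_name = None
--         else:
--             if prev_name is not None:
--                 result.append((prev_name, 1))
--             prev_name = part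
--     if prev_name is not None:
--         result.append((prev_name, 1))
--     return result
-- ===== SOURCE B (Python) =====
-- def _parse_item_rewards(reward_item_string: str) -> list[tuple[str, int]]:
--     parts = [s.strip() for s in reward_item_string.split(",")]
--     result: list[tuple[str, int]] = []
--     i = 0
--     while i < len(parts):
--         if parts[i].isdigit():
--             raise TypeError
--         if i + 1 < len(parts) and parts[i + 1].isdigit():
--             result.append((parts[i], int(parts[i + 1])))
--             i += 2
--         else:
--             result.append((parts[i], 1))
--             i += 1
--     return result
-- ===== Notes on version B (the rewrite author's own statement) =====
-- stated objective: alternative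
-- what changed: Replaces A's prev_name state machine (pending-name variable plus trailing flush) with an index-based lookahead loop that consumes name/count pairs in groups of one or two parts, building the result directly with no carried state.
import Mathlib
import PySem

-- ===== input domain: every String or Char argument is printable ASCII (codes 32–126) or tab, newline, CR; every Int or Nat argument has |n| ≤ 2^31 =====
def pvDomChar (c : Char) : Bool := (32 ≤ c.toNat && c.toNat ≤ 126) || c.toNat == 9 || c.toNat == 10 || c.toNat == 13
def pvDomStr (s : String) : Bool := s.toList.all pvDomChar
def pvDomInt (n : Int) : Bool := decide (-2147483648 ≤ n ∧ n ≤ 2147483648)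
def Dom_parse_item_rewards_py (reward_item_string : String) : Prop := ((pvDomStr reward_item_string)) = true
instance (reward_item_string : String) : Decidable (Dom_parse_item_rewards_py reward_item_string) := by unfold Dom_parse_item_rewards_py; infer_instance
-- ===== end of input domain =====

-- B replaces A's prev_name state machine (with its trailing flush) by an index-free lookahead
-- that consumes name/count pairs in groups; alternative decomposition, same asymptotic cost.

-- ===== PORT A =====
-- A's loop: state = (prev_name : Option String, result accumulator); trailing flush at the end.
-- On the inputs where Python raises TypeError (digit part with prev_name = None) the port
-- returns the accumulator so far; exactly those inputs are excluded by Pre_ below.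
def pvALoop : List String → Option String → List (String × Int) → List (String × Int)
  | [], prev, res =>
      match prev with
      | some n => res ++ [(n, 1)]
      | none => res
  | part :: rest, prev, res =>
      if PySem.Str.strIsdigit part then
        match prev with
        | none => res  -- Python: raise TypeError (outside Pre_)
        | some n => pvALoop rest none (res ++ [(n, (PySem.Int.ofStr? part).getD 0)])
      else
        match prev with
        | some n => pvALoop rest (some part) (res ++ [(n, 1)])
        | none => pvALoop rest (some part) res

def parse_item_rewards_py (reward_item_string : String) : List (String × Int) :=
  pvALoop (((PySem.Str.split? reward_item_string ",").getD []).map PySem.Str.strip) none []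

-- ===== PORT B =====
-- B's while-loop with lookahead: two parts consumed when a name is followed by a digit.
def pvBLoop : List String → List (String × Int)
  | [] => []
  | [p] => if PySem.Str.strIsdigit p then [] else [(p, 1)]  -- digit: Python raises (outside Pre_)
  | p :: q :: rest =>
      if PySem.Str.strIsdigit p then []  -- Python: raise TypeError (outside Pre_)
      else if PySem.Str.strIsdigit q then (p, (PySem.Int.ofStr? q).getD 0) :: pvBLoop rest
      else (p, 1) :: pvBLoop (q :: rest)

def parse_item_rewards_py_alt (reward_item_string : String) : List (String × Int) :=
  pvBLoop (((PySem.Str.split? reward_item_string ",").getD []).map PySem.Str.strip)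

-- ===== PRECONDITION & SPEC =====
-- Pre_ excludes exactly the inputs on which A raises TypeError: a (stripped) all-digit part
-- at the start, or immediately after another all-digit part.
def Pre_parse_item_rewards_py (reward_item_string : String) : Prop :=
  (∀ p ∈ (((PySem.Str.split? reward_item_string ",").getD []).map PySem.Str.strip).take 1,
      PySem.Str.strIsdigit p = false) ∧
  List.IsChain (fun a b => PySem.Str.strIsdigit b = true → PySem.Str.strIsdigit a = false)
    (((PySem.Str.split? reward_item_string ",").getD []).map PySem.Str.strip)
instance (reward_item_string : String) : Decidable (Pre_parse_item_rewards_py reward_item_string) := by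
  unfold Pre_parse_item_rewards_py; infer_instance

def pvWitness_parse_item_rewards_py : String := "medkit, 3, bread, vodka, 2"

def Spec_parse_item_rewards_py (reward_item_string : String) (out : List (String × Int)) : Prop := out = parse_item_rewards_py_alt reward_item_string
instance (reward_item_string : String) (out : List (String × Int)) : Decidable (Spec_parse_item_rewards_py reward_item_string out) := by unfold Spec_parse_item_rewards_py; infer_instance

-- ===== CLAIM (what is proved, stated in full; the proofs are below) =====
def Claim_equal_parse_item_rewards_py : Prop := ∀ (reward_item_string : String), Dom_parse_item_rewards_py reward_item_string → Pre_parse_item_rewards_py reward_item_string → Spec_parse_item_rewards_py reward_item_string (parse_item_rewards_py reward_item_string)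

-- ===== LEMMAS AND PROOFS =====

-- B's action when a pending name n is to be emitted against the remaining parts l.
def pvBStep (n : String) : List String → List (String × Int)
  | [] => [(n, 1)]
  | q :: rest =>
      if PySem.Str.strIsdigit q then (n, (PySem.Int.ofStr? q).getD 0) :: pvBLoop rest
      else (n, 1) :: pvBLoop (q :: rest)

lemma pvBLoop_cons (p : String) (rest : List String)
    (hp : PySem.Str.strIsdigit p = false) :
    pvBLoop (p :: rest) = pvBStep p rest := by
  rw [PySem.Str.strIsdigit_eq] at hp
  cases rest with
  | nil => simp [pvBLoop, pvBStep, hp]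
  | cons q r => simp [pvBLoop, pvBStep, hp]

lemma pvMain (l : List String)
    (hch : List.IsChain (fun a b => PySem.Str.strIsdigit b = true → PySem.Str.strIsdigit a = false) l) :
    ((∀ p ∈ l.take 1, PySem.Str.strIsdigit p = false) →
      ∀ res, pvALoop l none res = res ++ pvBLoop l) ∧
    (∀ n res, pvALoop l (some n) res = res ++ pvBStep n l) := by
  induction l with
  | nil =>
      constructor
      · intro _ res; simp [pvALoop, pvBLoop]
      · intro n res; simp [pvALoop, pvBStep]
  | cons p rest ih =>
      have hch' : List.IsChain (fun a b => PySem.Str.strIsdigit b = true → PySem.Str.strIsdigit a = false) rest :=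
        hch.tail
      have ih' := ih hch'
      constructor
      · intro hhd res
        have hp : PySem.Str.strIsdigit p = false := hhd p (by simp)
        rw [pvBLoop_cons p rest hp]
        simp only [pvALoop, hp]
        exact ih'.2 p res
      · intro n res
        by_cases hp : PySem.Str.strIsdigit p = true
        · -- p is a digit part: A emits (n, int p) and clears prev; rest must start non-digit.
          have hhd : ∀ q ∈ rest.take 1, PySem.Str.strIsdigit q = false := by
            intro q hq
            cases rest with
            | nil => simp at hq
            | cons r rr =>
                simp at hq; subst hq
                rcases List.isChain_cons_cons.mp hch with ⟨hrel, _⟩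
                by_cases hr : PySem.Str.strIsdigit q = true
                · rw [hrel hr] at hp; exact absurd hp (by decide)
                · simpa using hr
          simp only [pvALoop, hp, if_pos, pvBStep]
          rw [ih'.1 hhd]
          simp
        · have hp' : PySem.Str.strIsdigit p = false := by simpa using hp
          simp only [pvALoop, hp', Bool.false_eq_true, pvBStep]
          rw [ih'.2 p, pvBLoop_cons p rest hp']
          simp

-- ===== VERDICT (by name: the statement is the Claim_ definition above) =====
theorem parse_item_rewards_py_spec : Claim_equal_parse_item_rewards_py := by
  intro s _ hpre
  unfold Spec_parse_item_rewards_py parse_item_rewards_py parse_item_rewards_py_alt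
  rcases hpre with ⟨hhd, hch⟩
  simpa using (pvMain _ hch).1 hhd []
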